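-- pv_equiv track=rewrite | github.com/gbirzu/range_expansion_coalescent | scripts/analysis_tools.py | calculate_node_x
-- ===== SOURCE A (Python) =====
-- def calculate_node_x(nodes, N, L=300):
--     '''
--     Takes list of tree nodes and returns dictionary with nodes at each position along the front.
--     '''
--     sorted_nodes ={}
--     for x in range(L):
--         sorted_nodes[x] = []
--
--     for node in nodes:
--         node_id = int(node)
--         gen_factor = N * L
--         x = (node_id % gen_factor) // N
--         sorted_nodes[x].append(node)
--
--     return sorted_nodes
-- ===== SOURCE B (Python) =====
-- def calculate_node_x(nodes, N, L=300):
--     '''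
--     Takes list of tree nodes and returns dictionary with nodes at each position along the front.
--     '''
--     key = lambda node: (int(node) % (N * L)) // N
--     ordered = sorted(nodes, key=key)
--     groups = {}
--     i = 0
--     n = len(ordered)
--     while i < n:
--         x = key(ordered[i])
--         j = i
--         while j < n and key(ordered[j]) == x:
--             j += 1
--         groups[x] = ordered[i:j]
--         i = j
--     return {x: groups.get(x, []) for x in range(L)}
-- ===== Notes on version B (the rewrite author's own statement) =====
-- stated objective: alternative
-- what changed: Replaced A's scatter of each node into a pre-seeded dict of L buckets by a sort-then-group decomposition: stably sort the nodes by their computed position, collect the contiguous equal-position runs with a two-pointer sweep, then assemble the result for every x in range(L) with an empty-list default.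
import Mathlib
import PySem

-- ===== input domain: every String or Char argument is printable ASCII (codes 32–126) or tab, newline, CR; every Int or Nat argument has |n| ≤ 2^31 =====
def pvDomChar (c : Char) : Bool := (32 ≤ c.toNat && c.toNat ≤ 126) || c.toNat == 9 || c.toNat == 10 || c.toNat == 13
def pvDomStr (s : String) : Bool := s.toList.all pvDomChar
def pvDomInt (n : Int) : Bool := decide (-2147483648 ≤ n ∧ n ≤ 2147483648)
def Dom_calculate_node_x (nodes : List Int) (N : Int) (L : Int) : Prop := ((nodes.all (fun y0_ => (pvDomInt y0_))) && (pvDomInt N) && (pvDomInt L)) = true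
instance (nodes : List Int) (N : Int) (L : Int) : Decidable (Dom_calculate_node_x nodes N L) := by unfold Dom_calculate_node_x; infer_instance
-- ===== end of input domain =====

-- B replaces A's scatter-into-pre-seeded-dict-buckets by sort-by-position then group
-- contiguous runs (alternative decomposition, same exact result).

-- ===== PORT A =====
-- literal port: seed dict with keys range(L), then scatter each node into bucket
-- x = (node % (N*L)) // N.  (In Python, `sorted_nodes[x].append(node)` is a KeyError
-- when x is not a seeded key, and `// N` a ZeroDivisionError for N = 0 — those inputs
-- are outside Pre_ below.)
def calculate_node_x (nodes : List Int) (N : Int) (L : Int) : List (Int × List Int) :=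
  let d0 := (PySem.List.pyRange 0 L 1).foldl
      (fun d x => d.insert x ([] : List Int)) PySem.Dict.empty
  let d1 := nodes.foldl
      (fun d node =>
        let node_id := node          -- int(node)
        let gen_factor := N * L
        let x := PySem.Int.floordiv (PySem.Int.mod node_id gen_factor) N
        d.modify x [] (fun l => l ++ [node])) d0
  d1.items

-- ===== PORT B =====
-- the run-collecting while loop of Source B: take the maximal run of equal-key elements
-- at the front, store it under its key, continue on the rest
def pvGroupRuns (key : Int → Int) : List Int → PySem.Dict Int (List Int) → PySem.Dict Int (List Int)
  | [], groups => groups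
  | a :: rest, groups =>
      pvGroupRuns key (rest.dropWhile (fun y => key y == key a))
        (groups.insert (key a) (a :: rest.takeWhile (fun y => key y == key a)))
  termination_by l _ => l.length
  decreasing_by
    have := List.length_dropWhile_le (fun y => key y == key a) rest
    simp only [List.length_cons]
    omega

def calculate_node_x_alt (nodes : List Int) (N : Int) (L : Int) : List (Int × List Int) :=
  let key := fun node => PySem.Int.floordiv (PySem.Int.mod node (N * L)) N
  let ordered := PySem.List.sorted nodes key
  let groups := pvGroupRuns key ordered PySem.Dict.empty
  (PySem.List.pyRange 0 L 1).map (fun x => (x, groups.getD x []))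

-- ===== PRECONDITION & SPEC =====
-- Pre_ is exactly the set of inputs where Python A returns normally: for nonempty
-- nodes A needs N ≠ 0 (else ZeroDivisionError) and 0 < L (else the bucket dict is
-- empty and the append is a KeyError); for empty nodes the scatter loop never runs.
def Pre_calculate_node_x (nodes : List Int) (N : Int) (L : Int) : Prop :=
  nodes = [] ∨ (N ≠ 0 ∧ 0 < L)
instance (nodes : List Int) (N : Int) (L : Int) : Decidable (Pre_calculate_node_x nodes N L) := by unfold Pre_calculate_node_x; infer_instance

def pvWitness_calculate_node_x : List Int × Int × Int := ([0, 1, 5, 7, -3], 2, 3)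

def Spec_calculate_node_x (nodes : List Int) (N : Int) (L : Int) (out : List (Int × List Int)) : Prop := out = calculate_node_x_alt nodes N L
instance (nodes : List Int) (N : Int) (L : Int) (out : List (Int × List Int)) : Decidable (Spec_calculate_node_x nodes N L out) := by unfold Spec_calculate_node_x; infer_instance

-- ===== CLAIM (what is proved, stated in full; the proofs are below) =====
def Claim_equal_calculate_node_x : Prop := ∀ (nodes : List Int) (N : Int) (L : Int), Dom_calculate_node_x nodes N L → Pre_calculate_node_x nodes N L → Spec_calculate_node_x nodes N L (calculate_node_x nodes N L)

-- ===== LEMMAS AND PROOFS =====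

-- the bucket position lies in [0, L) whenever N ≠ 0 and 0 < L
theorem pv_pos_range (N L n : Int) (hN : N ≠ 0) (hL : 0 < L) :
    0 ≤ PySem.Int.floordiv (PySem.Int.mod n (N * L)) N ∧
      PySem.Int.floordiv (PySem.Int.mod n (N * L)) N < L := by
  rcases lt_or_gt_of_ne hN with hneg | hpos
  · have hgf : N * L < 0 := mul_neg_of_neg_of_pos hneg hL
    obtain ⟨hm1, hm2⟩ := PySem.Int.mod_neg_bounds n hgf
    set m := PySem.Int.mod n (N * L) with hm
    have h1 : PySem.Int.floordiv m N = PySem.Int.floordiv (-m) (-N) := by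
      have := PySem.Int.floordiv_neg_neg (-m) (-N)
      simp only [neg_neg] at this
      exact this
    have hNpos : 0 < -N := by omega
    rw [h1, PySem.Int.floordiv_eq_ediv_of_pos hNpos]
    constructor
    · exact Int.ediv_nonneg (by omega) (by omega)
    · rw [Int.ediv_lt_iff_lt_mul hNpos]
      nlinarith
  · have hgf : 0 < N * L := mul_pos hpos hL
    have hm1 := PySem.Int.mod_nonneg n hgf
    have hm2 := PySem.Int.mod_lt n hgf
    rw [PySem.Int.floordiv_eq_ediv_of_pos hpos]
    constructor
    · exact Int.ediv_nonneg hm1 (by omega)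
    · rw [Int.ediv_lt_iff_lt_mul hpos]
      nlinarith

-- ===== A characterised: bucket x holds the nodes whose position is x, in order =====
theorem pv_A_char (nodes : List Int) (N L : Int)
    (h : ∀ n ∈ nodes, 0 ≤ PySem.Int.floordiv (PySem.Int.mod n (N * L)) N ∧
           PySem.Int.floordiv (PySem.Int.mod n (N * L)) N < L) :
    calculate_node_x nodes N L =
      (PySem.List.pyRange 0 L 1).map
        (fun x => (x, nodes.filter
          (fun n => PySem.Int.floordiv (PySem.Int.mod n (N * L)) N == x))) := by
  set key := fun n => PySem.Int.floordiv (PySem.Int.mod n (N * L)) N with hkey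
  set R := PySem.List.pyRange 0 L 1 with hR
  set d0 := R.foldl (fun d x => d.insert x ([] : List Int)) PySem.Dict.empty with hd0
  have h0 : d0.items = R.map (fun x => (x, ([] : List Int))) := by
    have := PySem.Dict.items_foldl_insert_fresh R (fun a => a) (fun _ => ([] : List Int))
      PySem.Dict.empty (by intro a _; simp) (by simpa using PySem.List.nodup_pyRange_one 0 L)
    simpa using this
  have hk0 : d0.keys = R := by
    simp only [PySem.Dict.keys, h0, List.map_map]
    simp [Function.comp_def]
  have hnR : R.Nodup := PySem.List.nodup_pyRange_one 0 L
  have hget0 : ∀ c ∈ R, d0.getD c [] = [] := by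
    intro c hc
    exact PySem.Dict.getD_of_mem_items d0
      (by rw [h0]; exact List.mem_map_of_mem hc) (by rw [hk0]; exact hnR) []
  set d1 := nodes.foldl (fun d node => d.modify (key node) [] (fun l => l ++ [node])) d0 with hd1
  have hmemR : ∀ n ∈ nodes, key n ∈ R := by
    intro n hn
    rw [hR, PySem.List.mem_pyRange_one]
    exact (h n hn)
  have hkeys1 : d1.keys = R := by
    rw [hd1, PySem.Dict.keys_foldl_modify_key nodes key [] (fun _ x v => v ++ [x]) d0,
      PySem.Set.update_eq_append_filter, hk0]
    have : (PySem.Set.ofList (nodes.map key)).filter (fun y => !(PySem.Set.contains R y)) = [] := by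
      rw [List.filter_eq_nil_iff]
      intro y hy
      have hy' : y ∈ nodes.map key := (PySem.Set.mem_ofList _ _).mp hy
      obtain ⟨n, hn, rfl⟩ := List.mem_map.mp hy'
      simpa using hmemR n hn
    rw [this, List.append_nil]
  have hnodup1 : d1.keys.Nodup := by rw [hkeys1]; exact hnR
  have hget1 : ∀ c, d1.getD c [] = d0.getD c [] ++ nodes.filter (fun n => key n == c) := by
    intro c
    have hmap : d1 = (nodes.map (fun n => (key n, n))).foldl
        (fun d p => d.modify p.1 [] (fun l => l ++ [p.2])) d0 := by
      rw [List.foldl_map]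
    rw [hmap, PySem.Dict.getD_foldl_modify_append]
    congr 1
    rw [List.filter_map]
    simp [Function.comp_def]
  show d1.items = _
  rw [PySem.Dict.items_eq_map_keys d1 hnodup1 [], hkeys1]
  apply List.map_congr_left
  intro x hx
  rw [hget1 x, hget0 x hx, List.nil_append]

-- every element dropped past the first run has a strictly larger key (sorted input)
theorem pv_dropWhile_gt (key : Int → Int) (a : Int) (rest : List Int)
    (hp : (a :: rest).Pairwise (fun u v => key u ≤ key v)) :
    ∀ y ∈ rest.dropWhile (fun y => key y == key a), key a < key y := by
  induction rest with
  | nil => intro y hy; simp [List.dropWhile] at hy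
  | cons b t ih =>
    rcases List.pairwise_cons.mp hp with ⟨hab, hpt⟩
    by_cases hb : key b = key a
    · intro y hy
      rw [List.dropWhile_cons] at hy
      simp only [hb, beq_self_eq_true, if_true] at hy
      apply ih _ y hy
      rw [List.pairwise_cons] at hpt ⊢
      refine ⟨fun v hv => ?_, hpt.2⟩
      calc key a = key b := hb.symm
        _ ≤ key v := hpt.1 v hv
    · intro y hy
      rw [List.dropWhile_cons] at hy
      simp only [beq_iff_eq, hb, if_false] at hy
      have hba : key a ≤ key b := hab b (by simp)
      rcases List.mem_cons.mp hy with rfl | hyt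
      · omega
      · have : key b ≤ key y := (List.pairwise_cons.mp hpt).1 y hyt
        omega

-- the run dictionary looks up the (contiguous) group of a key, given sorted input
theorem pv_runs_getD (key : Int → Int) (l : List Int) (d : PySem.Dict Int (List Int)) :
    l.Pairwise (fun u v => key u ≤ key v) → ∀ c : Int,
    (pvGroupRuns key l d).getD c [] =
      if c ∈ l.map key then l.filter (fun n => key n == c) else d.getD c [] := by
  induction l, d using pvGroupRuns.induct (key := key) with
  | case1 groups => intro _ c; simp [pvGroupRuns]
  | case2 a rest groups ih =>
    intro hp c
    rw [pvGroupRuns]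
    have hgt := pv_dropWhile_gt key a rest hp
    have htw : ∀ y ∈ rest.takeWhile (fun y => key y == key a), key y = key a := by
      intro y hy
      have := List.mem_takeWhile_imp hy
      simpa using this
    have hsplit : rest = rest.takeWhile (fun y => key y == key a) ++
        rest.dropWhile (fun y => key y == key a) := (List.takeWhile_append_dropWhile).symm
    have hp' : (rest.dropWhile (fun y => key y == key a)).Pairwise
        (fun u v => key u ≤ key v) := by
      have : (rest.dropWhile (fun y => key y == key a)).Sublist (a :: rest) := by
        exact (List.dropWhile_sublist _).trans (List.sublist_cons_self a rest)
      exact hp.sublist this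
    rw [ih hp' c]
    by_cases hc : c ∈ (rest.dropWhile (fun y => key y == key a)).map key
    · -- c occurs past the first run: it is strictly larger than key a
      obtain ⟨y, hy, rfl⟩ := List.mem_map.mp hc
      have hya : key a < key y := hgt y hy
      simp only [hc, if_true]
      have hmem : key y ∈ (a :: rest).map key := by
        rw [hsplit]
        simp only [List.map_cons, List.map_append, List.mem_cons, List.mem_append]
        exact Or.inr (Or.inr (List.mem_map_of_mem hy))
      rw [if_pos hmem]
      -- the first run contributes nothing to the filter
      conv_rhs => rw [show (a :: rest) = (a :: rest.takeWhile (fun y => key y == key a)) ++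
        rest.dropWhile (fun y => key y == key a) by simp [← hsplit]]
      rw [List.filter_append]
      have : (a :: rest.takeWhile (fun y => key y == key a)).filter
          (fun n => key n == key y) = [] := by
        rw [List.filter_eq_nil_iff]
        intro b hb
        rcases List.mem_cons.mp hb with rfl | hbt
        · simp; omega
        · have := htw b hbt; simp [this]; omega
      rw [this, List.nil_append]
    · simp only [hc, if_false]
      rw [PySem.Dict.getD_insert]
      by_cases hca : c = key a
      · have hmem : c ∈ (a :: rest).map key := by simp [hca]
        rw [if_pos hca, if_pos hmem]
        -- the whole filter is exactly the first run
        conv_rhs => rw [show (a :: rest) = (a :: rest.takeWhile (fun y => key y == key a)) ++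
          rest.dropWhile (fun y => key y == key a) by simp [← hsplit]]
        rw [List.filter_append]
        have h1 : (a :: rest.takeWhile (fun y => key y == key a)).filter
            (fun n => key n == c) = a :: rest.takeWhile (fun y => key y == key a) := by
          rw [List.filter_eq_self]
          intro b hb
          rcases List.mem_cons.mp hb with rfl | hbt
          · simp [hca]
          · have := htw b hbt; simp [this, hca]
        have h2 : (rest.dropWhile (fun y => key y == key a)).filter
            (fun n => key n == c) = [] := by
          rw [List.filter_eq_nil_iff]
          intro b hb
          have := hgt b hb
          simp [hca]; omega
        rw [h1, h2, List.append_nil]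
      · rw [if_neg hca]
        have hmem : c ∉ (a :: rest).map key := by
          intro hmem
          rw [hsplit] at hmem
          simp only [List.map_cons, List.map_append, List.mem_cons, List.mem_append] at hmem
          rcases hmem with h | h | h
          · exact hca h
          · obtain ⟨b, hbt, rfl⟩ := List.mem_map.mp h
            exact hca (htw b hbt)
          · exact hc h
        rw [if_neg hmem]

-- appending one element then sorting = inserting it into the sorted prefix
theorem pv_sorted_append (key : Int → Int) (ys : List Int) (x : Int) :
    PySem.List.sorted (ys ++ [x]) key =
      PySem.List.insertBy (fun a b => decide (key a < key b)) x (PySem.List.sorted ys key) := by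
  rw [PySem.List.sorted_eq_foldl_insertBy, PySem.List.sorted_eq_foldl_insertBy,
    List.foldl_append]
  rfl

-- inserting into a sorted list puts x after all equal-key elements (stability)
theorem pv_filter_insertBy (key : Int → Int) (c x : Int) (ys : List Int)
    (hp : ys.Pairwise (fun u v => key u ≤ key v)) :
    (PySem.List.insertBy (fun a b => decide (key a < key b)) x ys).filter
        (fun n => key n == c) =
      if key x == c then ys.filter (fun n => key n == c) ++ [x]
      else ys.filter (fun n => key n == c) := by
  induction ys with
  | nil =>
    simp only [PySem.List.insertBy, List.filter_nil]
    by_cases hx : key x = c <;> simp [hx]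
  | cons y t ih =>
    rcases List.pairwise_cons.mp hp with ⟨hyt, hpt⟩
    by_cases hb : key x < key y
    · rw [show PySem.List.insertBy (fun a b => decide (key a < key b)) x (y :: t) =
        x :: y :: t by simp [PySem.List.insertBy, hb]]
      by_cases hx : key x = c
      · have h0 : (y :: t).filter (fun n => key n == c) = [] := by
          rw [List.filter_eq_nil_iff]
          intro b hbm
          rcases List.mem_cons.mp hbm with rfl | hbt
          · simp; omega
          · have := hyt b hbt; simp; omega
        simp [hx, h0]
      · simp [List.filter_cons, hx]
    · rw [show PySem.List.insertBy (fun a b => decide (key a < key b)) x (y :: t) =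
        y :: PySem.List.insertBy (fun a b => decide (key a < key b)) x t by
          simp [PySem.List.insertBy, hb]]
      rw [List.filter_cons, ih hpt]
      by_cases hx : key x = c <;> by_cases hy : key y = c <;>
        simp [hx, hy]
  
-- stable sort: the elements of any one key keep their original order
theorem pv_filter_sorted (key : Int → Int) (nodes : List Int) (c : Int) :
    (PySem.List.sorted nodes key).filter (fun n => key n == c) =
      nodes.filter (fun n => key n == c) := by
  induction nodes using List.reverseRecOn with
  | nil => rfl
  | append_singleton ys x ih =>
    rw [pv_sorted_append, pv_filter_insertBy key c x _ (PySem.List.sorted_pairwise ys key),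
      List.filter_append]
    by_cases hx : key x = c <;> simp [hx, ih]

-- ===== B characterised: the same buckets =====
theorem pv_B_char (nodes : List Int) (N L : Int) :
    calculate_node_x_alt nodes N L =
      (PySem.List.pyRange 0 L 1).map
        (fun x => (x, nodes.filter
          (fun n => PySem.Int.floordiv (PySem.Int.mod n (N * L)) N == x))) := by
  set key := fun n => PySem.Int.floordiv (PySem.Int.mod n (N * L)) N with hkey
  show (PySem.List.pyRange 0 L 1).map
      (fun x => (x, (pvGroupRuns key (PySem.List.sorted nodes key) PySem.Dict.empty).getD x []))
    = _
  apply List.map_congr_left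
  intro x _
  have hres : (pvGroupRuns key (PySem.List.sorted nodes key) PySem.Dict.empty).getD x [] =
      (PySem.List.sorted nodes key).filter (fun n => key n == x) := by
    rw [pv_runs_getD key _ PySem.Dict.empty (PySem.List.sorted_pairwise nodes key) x]
    by_cases hm : x ∈ (PySem.List.sorted nodes key).map key
    · rw [if_pos hm]
    · rw [if_neg hm]
      have : (PySem.List.sorted nodes key).filter (fun n => key n == x) = [] := by
        rw [List.filter_eq_nil_iff]
        intro b hb hkb
        exact hm (List.mem_map.mpr ⟨b, hb, by simpa using hkb⟩)
      rw [this]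
      simp [PySem.Dict.getD_empty]
  rw [hres, pv_filter_sorted]

-- ===== VERDICT (by name: the statement is the Claim_ definition above) =====
theorem calculate_node_x_spec : Claim_equal_calculate_node_x := by
  intro nodes N L _ hpre
  show calculate_node_x nodes N L = calculate_node_x_alt nodes N L
  rw [pv_B_char]
  apply pv_A_char
  intro n hn
  rcases hpre with rfl | ⟨hN, hL⟩
  · simp at hn
  · exact pv_pos_range N L n hN hL
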